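-- pv_equiv track=rewrite | github.com/ivlri/PyRevitExtensions | PyRevitExt/PyRevitExt.tab/Проверки ModelChecker.panel/Проверки ModelChecker.pulldown/save/script.py | get_check_path
-- ===== SOURCE A (Python) =====
-- def get_check_path(doc_name, user_group):
--     doc_name_upper = doc_name.upper()
--
--     if user_group in ['AR', 'SC']:
--         path_dict = paths[user_group]
--         for key in sorted(path_dict.keys(), key=lambda x: -len(x)):
--             if key.upper() in doc_name_upper:
--                 return path_dict[key]
--         return next(iter(path_dict.values()))
--
--     return paths.get(user_group)
--
-- paths = {
--     'AR': {
--         '_AR_': r"\\fs\public\Холдинг\ПоревитД\ТИМ\01_Библиотека\01_Рабочие задачи\ALL_Общие проверки файлов\MC_01_Проверка файла AR для Архитектора_V1.0.xml",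
--         '_AR_Rooms': r"\\fs\public\Холдинг\ПоревитД\ТИМ\01_Библиотека\01_Рабочие задачи\ALL_Общие проверки файлов\MC_06_Проверка файла Rooms_V1.1.xml"
--     },
--     'SC': {
--         '_AR_': r"\\fs\public\Холдинг\ПоревитД\ТИМ\01_Библиотека\01_Рабочие задачи\ALL_Общие проверки файлов\MC_02_Проверка файла AR для ПГС_V1.1.xml",
--         '_SC_': r"\\fs\public\Холдинг\ПоревитД\ТИМ\01_Библиотека\01_Рабочие задачи\ALL_Общие проверки файлов\MC_03_Проверка файла SC_V1.2.xml",
--         '_AS_': r"\\fs\public\Холдинг\ПоревитД\ТИМ\01_Библиотека\01_Рабочие задачи\ALL_Общие проверки файлов\MC_04_Проверка файла AS_V1.0.xml"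
--     },
--     'WSS': r"\\fs\public\Холдинг\ПоревитД\ТИМ\01_Библиотека\01_Рабочие задачи\ALL_Общие проверки файлов\MC_05_Проверка файла MEP_V1.1.xml",
--     'HWAC': r"\\fs\public\Холдинг\ПоревитД\ТИМ\01_Библиотека\01_Рабочие задачи\ALL_Общие проверки файлов\MC_05_Проверка файла MEP_V1.1.xml",
--     'ESS': r"\\fs\public\Холдинг\ПоревитД\ТИМ\01_Библиотека\01_Рабочие задачи\ALL_Общие проверки файлов\MC_01_Проверка файла AR для Архитектора_V1.0.xml"
-- }
-- ===== SOURCE B (Python) =====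
-- def get_check_path(doc_name, user_group):
--     doc_name_upper = doc_name.upper()
--
--     if user_group in ['AR', 'SC']:
--         path_dict = paths[user_group]
--         best_key = None
--         best_val = None
--         for key, val in path_dict.items():
--             if key.upper() in doc_name_upper and (best_key is None or len(key) > len(best_key)):
--                 best_key, best_val = key, val
--         if best_key is not None:
--             return best_val
--         return next(iter(path_dict.values()))
--
--     return paths.get(user_group)
--
-- paths = {
--     'AR': {
--         '_AR_': r"\\fs\public\Холдинг\ПоревитД\ТИМ\01_Библиотека\01_Рабочие задачи\ALL_Общие проверки файлов\MC_01_Проверка файла AR для Архитектора_V1.0.xml",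
--         '_AR_Rooms': r"\\fs\public\Холдинг\ПоревитД\ТИМ\01_Библиотека\01_Рабочие задачи\ALL_Общие проверки файлов\MC_06_Проверка файла Rooms_V1.1.xml"
--     },
--     'SC': {
--         '_AR_': r"\\fs\public\Холдинг\ПоревитД\ТИМ\01_Библиотека\01_Рабочие задачи\ALL_Общие проверки файлов\MC_02_Проверка файла AR для ПГС_V1.1.xml",
--         '_SC_': r"\\fs\public\Холдинг\ПоревитД\ТИМ\01_Библиотека\01_Рабочие задачи\ALL_Общие проверки файлов\MC_03_Проверка файла SC_V1.2.xml",
--         '_AS_': r"\\fs\public\Холдинг\ПоревитД\ТИМ\01_Библиотека\01_Рабочие задачи\ALL_Общие проверки файлов\MC_04_Проверка файла AS_V1.0.xml"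
--     },
--     'WSS': r"\\fs\public\Холдинг\ПоревитД\ТИМ\01_Библиотека\01_Рабочие задачи\ALL_Общие проверки файлов\MC_05_Проверка файла MEP_V1.1.xml",
--     'HWAC': r"\\fs\public\Холдинг\ПоревитД\ТИМ\01_Библиотека\01_Рабочие задачи\ALL_Общие проверки файлов\MC_05_Проверка файла MEP_V1.1.xml",
--     'ESS': r"\\fs\public\Холдинг\ПоревитД\ТИМ\01_Библиотека\01_Рабочие задачи\ALL_Общие проверки файлов\MC_01_Проверка файла AR для Архитектора_V1.0.xml"
-- }
-- ===== Notes on version B (the rewrite author's own statement) =====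
-- stated objective: simpler
-- what changed: Replaced A's sort-all-keys-by-descending-length-then-scan-for-first-match with a single pass over the dict items that keeps the matching key of strictly greatest length seen so far (strict '>' so insertion order breaks ties like the stable sort), falling back to the first value when no key matches.
import Mathlib
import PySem

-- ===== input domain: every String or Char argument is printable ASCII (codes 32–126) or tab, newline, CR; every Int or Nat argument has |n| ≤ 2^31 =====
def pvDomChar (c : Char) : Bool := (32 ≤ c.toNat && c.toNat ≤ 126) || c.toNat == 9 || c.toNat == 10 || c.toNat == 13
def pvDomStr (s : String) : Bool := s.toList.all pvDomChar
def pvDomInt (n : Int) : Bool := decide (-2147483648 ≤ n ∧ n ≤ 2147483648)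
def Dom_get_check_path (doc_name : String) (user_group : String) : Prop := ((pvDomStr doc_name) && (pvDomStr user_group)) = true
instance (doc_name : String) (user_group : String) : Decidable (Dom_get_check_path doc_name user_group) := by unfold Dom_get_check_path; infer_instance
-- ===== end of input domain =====

-- B replaces A's sort-keys-by-length-then-scan with a single pass keeping the longest matching key (strict '>', so insertion order breaks ties like the stable sort); objective: simpler.

-- ===== PORT A =====
-- The module-level 'paths' dict has mixed value types (sub-dicts for 'AR'/'SC', strings otherwise);
-- it is split into the two sub-dicts and the scalar part, which is faithful because the code reads
-- paths[user_group] only under the 'AR'/'SC' guard and paths.get(user_group) only outside it.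
def pvPathsAR : PySem.Dict String String := PySem.Dict.mk
  [("_AR_", "\\\\fs\\public\\Холдинг\\ПоревитД\\ТИМ\\01_Библиотека\\01_Рабочие задачи\\ALL_Общие проверки файлов\\MC_01_Проверка файла AR для Архитектора_V1.0.xml"),
   ("_AR_Rooms", "\\\\fs\\public\\Холдинг\\ПоревитД\\ТИМ\\01_Библиотека\\01_Рабочие задачи\\ALL_Общие проверки файлов\\MC_06_Проверка файла Rooms_V1.1.xml")]

def pvPathsSC : PySem.Dict String String := PySem.Dict.mk
  [("_AR_", "\\\\fs\\public\\Холдинг\\ПоревитД\\ТИМ\\01_Библиотека\\01_Рабочие задачи\\ALL_Общие проверки файлов\\MC_02_Проверка файла AR для ПГС_V1.1.xml"),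
   ("_SC_", "\\\\fs\\public\\Холдинг\\ПоревитД\\ТИМ\\01_Библиотека\\01_Рабочие задачи\\ALL_Общие проверки файлов\\MC_03_Проверка файла SC_V1.2.xml"),
   ("_AS_", "\\\\fs\\public\\Холдинг\\ПоревитД\\ТИМ\\01_Библиотека\\01_Рабочие задачи\\ALL_Общие проверки файлов\\MC_04_Проверка файла AS_V1.0.xml")]

def pvPathsScalar : PySem.Dict String String := PySem.Dict.mk
  [("WSS", "\\\\fs\\public\\Холдинг\\ПоревитД\\ТИМ\\01_Библиотека\\01_Рабочие задачи\\ALL_Общие проверки файлов\\MC_05_Проверка файла MEP_V1.1.xml"),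
   ("HWAC", "\\\\fs\\public\\Холдинг\\ПоревитД\\ТИМ\\01_Библиотека\\01_Рабочие задачи\\ALL_Общие проверки файлов\\MC_05_Проверка файла MEP_V1.1.xml"),
   ("ESS", "\\\\fs\\public\\Холдинг\\ПоревитД\\ТИМ\\01_Библиотека\\01_Рабочие задачи\\ALL_Общие проверки файлов\\MC_01_Проверка файла AR для Архитектора_V1.0.xml")]

-- A's for-loop over the sorted keys: first key whose upper-case form occurs in doc_name_upper
-- returns path_dict[key]; falling off the loop returns next(iter(path_dict.values())).
def pvLoopA (path_dict : PySem.Dict String String) (doc_name_upper : String) :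
    List String → Option String
  | [] => (PySem.Dict.values path_dict).head?
  | k :: ks =>
      if PySem.Str.isIn (PySem.Str.upper k) doc_name_upper then
        PySem.Dict.get? path_dict k
      else pvLoopA path_dict doc_name_upper ks

def get_check_path (doc_name : String) (user_group : String) : Option String :=
  let doc_name_upper := PySem.Str.upper doc_name
  if user_group = "AR" ∨ user_group = "SC" then
    let path_dict := if user_group = "AR" then pvPathsAR else pvPathsSC
    pvLoopA path_dict doc_name_upper
      (PySem.List.sorted (PySem.Dict.keys path_dict) (fun x => -(PySem.Str.len x : Int)) false)
  else
    PySem.Dict.get? pvPathsScalar user_group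

-- ===== PORT B =====
-- B's single pass over path_dict.items(): keep (best_key, best_val) = matching key of strictly
-- greatest length seen so far.
def pvBestB (doc_name_upper : String) :
    List (String × String) → Option (String × String) → Option (String × String)
  | [], best => best
  | (k, v) :: rest, best =>
      pvBestB doc_name_upper rest
        (if PySem.Str.isIn (PySem.Str.upper k) doc_name_upper &&
            (match best with
             | none => true
             | some (bk, _) => decide (PySem.Str.len bk < PySem.Str.len k)) then
          some (k, v)
        else best)

def get_check_path_alt (doc_name : String) (user_group : String) : Option String :=
  let doc_name_upper := PySem.Str.upper doc_name
  if user_group = "AR" ∨ user_group = "SC" then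
    let path_dict := if user_group = "AR" then pvPathsAR else pvPathsSC
    match pvBestB doc_name_upper path_dict.items none with
    | some (_, v) => some v
    | none => (PySem.Dict.values path_dict).head?
  else
    PySem.Dict.get? pvPathsScalar user_group

-- ===== PRECONDITION & SPEC =====
def Spec_get_check_path (doc_name : String) (user_group : String) (out : Option String) : Prop := out = get_check_path_alt doc_name user_group
instance (doc_name : String) (user_group : String) (out : Option String) : Decidable (Spec_get_check_path doc_name user_group out) := by unfold Spec_get_check_path; infer_instance

-- ===== CLAIM (what is proved, stated in full; the proofs are below) =====
def Claim_equal_get_check_path : Prop := ∀ (doc_name : String) (user_group : String), Dom_get_check_path doc_name user_group → Spec_get_check_path doc_name user_group (get_check_path doc_name user_group)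

-- ===== LEMMAS AND PROOFS =====

theorem sortedAR :
    PySem.List.sorted (PySem.Dict.keys pvPathsAR) (fun x => -(PySem.Str.len x : Int)) false
      = ["_AR_Rooms", "_AR_"] := by decide

theorem sortedSC :
    PySem.List.sorted (PySem.Dict.keys pvPathsSC) (fun x => -(PySem.Str.len x : Int)) false
      = ["_AR_", "_SC_", "_AS_"] := by decide

theorem eqAR (u : String) :
    pvLoopA pvPathsAR u ["_AR_Rooms", "_AR_"]
      = (match pvBestB u pvPathsAR.items none with
         | some (_, v) => some v
         | none => (PySem.Dict.values pvPathsAR).head?) := by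
  by_cases h1 : PySem.Chars.isIn (PySem.Chars.upper ['_','A','R','_','R','o','o','m','s']) u.toList = true <;>
    by_cases h2 : PySem.Chars.isIn (PySem.Chars.upper ['_','A','R','_']) u.toList = true <;>
      simp [pvLoopA, pvBestB, pvPathsAR, h1, h2, PySem.Dict.get?, PySem.Dict.values]

theorem eqSC (u : String) :
    pvLoopA pvPathsSC u ["_AR_", "_SC_", "_AS_"]
      = (match pvBestB u pvPathsSC.items none with
         | some (_, v) => some v
         | none => (PySem.Dict.values pvPathsSC).head?) := by
  by_cases h1 : PySem.Chars.isIn (PySem.Chars.upper ['_','A','R','_']) u.toList = true <;>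
    by_cases h2 : PySem.Chars.isIn (PySem.Chars.upper ['_','S','C','_']) u.toList = true <;>
      by_cases h3 : PySem.Chars.isIn (PySem.Chars.upper ['_','A','S','_']) u.toList = true <;>
        simp [pvLoopA, pvBestB, pvPathsSC, h1, h2, h3, PySem.Dict.get?, PySem.Dict.values]

-- ===== VERDICT (by name: the statement is the Claim_ definition above) =====
theorem get_check_path_spec : Claim_equal_get_check_path := by
  intro doc_name user_group _
  unfold Spec_get_check_path get_check_path get_check_path_alt
  by_cases hg : user_group = "AR" ∨ user_group = "SC"
  · rcases hg with h | h <;> subst h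
    · simp only [true_or, if_true]
      rw [sortedAR, eqAR]
    · have h1 : (("SC":String) = "AR") = False := by simp
      simp only [or_true, if_true, h1, if_false]
      rw [sortedSC, eqSC]
  · simp [hg]
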